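-- pv_equiv track=rewrite | github.com/LeoSpallino/adventofcode | src/2023/14/main.py | runForNCycles
-- ===== SOURCE A (Python) =====
-- def tiltRocks(line, dir):
--     swaps = True
--     if dir == "WEST" or dir == "NORTH":
--         line = line[::-1]
--
--     while swaps:
--         swaps = False
--         for i in range(len(line) - 1):
--             if line[i] == "O" and line[i + 1] == ".":
--                 line[i], line[i + 1] = line[i + 1], line[i]
--                 swaps = True
--
--     if dir == "WEST" or dir == "NORTH":
--         return line[::-1]
--
--     return line
--
-- def tiltCycle(rocks):
--     cycle = ["NORTH", "WEST", "SOUTH", "EAST"]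
--
--     for dir in cycle:
--         if dir == "NORTH" or dir == "SOUTH":
--             rocks = [list(col) for col in zip(*rocks)]
--
--         tilted = []
--         for line in rocks:
--             tilted.append(tiltRocks(line, dir))
--
--         if dir == "NORTH" or dir == "SOUTH":
--             tilted = [list(row) for row in zip(*tilted)]
--
--         rocks = tilted
--
--     return rocks
--
-- def stringifyRocks(rocks):
--     return "".join(["".join(row) for row in rocks])
--
-- def runForNCycles(rocks, N):
--     tilted = rocks
--     cycleCount = 0
--     cycleLength = 1
--     hasCycle = False
--     rockHist = {}
--     rockHist[stringifyRocks(tilted)] = cycleCount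
--
--     while not hasCycle:
--         hasCycle = True
--         tilted = tiltCycle(tilted)
--         cycleCount += 1
--         lookup = stringifyRocks(tilted)
--
--         if cycleCount == N:
--             return tilted
--
--         if lookup not in rockHist:
--             hasCycle = False
--             rockHist[lookup] = cycleCount
--
--         cycleLength = cycleCount - rockHist[lookup]
--
--     remainingCycles = (N - rockHist[stringifyRocks(tilted)]) % cycleLength
--
--     for _ in range(remainingCycles):
--         tilted = tiltCycle(tilted)
--
--     return tilted
-- ===== SOURCE B (Python) =====
-- def _packLine(line):
--     # Pack each maximal run of "O"/"." cells: dots first, then O's (O's drift to the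
--     # high end); any other cell is a fixed blocker.  One pass with two counters.
--     out = []
--     o = d = 0
--     for cell in line:
--         if cell == "O":
--             o += 1
--         elif cell == ".":
--             d += 1
--         else:
--             if d:
--                 out += ["."] * d
--                 d = 0
--             if o:
--                 out += ["O"] * o
--                 o = 0
--             out.append(cell)
--     if d:
--         out += ["."] * d
--     if o:
--         out += ["O"] * o
--     return out
--
-- def _tiltLine(line, dir):
--     if "O" not in line or "." not in line:
--         return line  # nothing can move: no rock, or no space
--     if dir == "WEST" or dir == "NORTH":
--         return _packLine(line[::-1])[::-1]
--     return _packLine(line)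
--
-- def _tiltCycleFast(rocks):
--     for dir in ("NORTH", "WEST", "SOUTH", "EAST"):
--         if dir == "NORTH" or dir == "SOUTH":
--             rocks = [list(col) for col in zip(*rocks)]
--         rocks = [_tiltLine(line, dir) for line in rocks]
--         if dir == "NORTH" or dir == "SOUTH":
--             rocks = [list(row) for row in zip(*rocks)]
--     return rocks
--
-- def _key(rocks):
--     return "".join(["".join(row) for row in rocks])
--
-- def runForNCycles(rocks, N):
--     seen = [_key(rocks)]
--     tilted = rocks
--     while True:
--         tilted = _tiltCycleFast(tilted)
--         k = _key(tilted)
--         if len(seen) == N: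
--             return tilted
--         if k in seen:
--             i = seen.index(k)
--             break
--         seen.append(k)
--     period = len(seen) - i
--     for _ in range((N - i) % period):
--         tilted = _tiltCycleFast(tilted)
--     return tilted
-- ===== Notes on version B (the rewrite author's own statement) =====
-- stated objective: alternative
-- what changed: Each line tilt is a single counting pass (runs split on blocker cells, each run re-emitted as dots then O's, with a fast path for lines containing no 'O' or no '.') instead of A's repeated in-place bubble-swap passes until no swap occurs, and the cycle history is a plain list of seen states queried positionally instead of a dict mapping state to count.
import Mathlib
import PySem

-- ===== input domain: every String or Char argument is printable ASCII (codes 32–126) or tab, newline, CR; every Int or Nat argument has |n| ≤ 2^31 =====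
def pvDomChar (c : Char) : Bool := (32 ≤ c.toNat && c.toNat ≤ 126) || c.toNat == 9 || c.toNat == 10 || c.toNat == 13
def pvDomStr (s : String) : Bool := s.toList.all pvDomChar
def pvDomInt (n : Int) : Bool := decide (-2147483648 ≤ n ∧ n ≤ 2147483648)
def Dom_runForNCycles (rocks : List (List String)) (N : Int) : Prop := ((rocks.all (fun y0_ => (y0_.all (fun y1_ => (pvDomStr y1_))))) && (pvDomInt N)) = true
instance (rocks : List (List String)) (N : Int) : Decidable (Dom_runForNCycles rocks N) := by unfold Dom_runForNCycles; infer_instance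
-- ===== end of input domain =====

-- B replaces A's bubble-until-fixpoint tilt of each line with a single counting pass
-- per line (with a no-rock/no-space fast path) and the dict cycle history with a plain
-- list of seen states; the return values are proved identical on all inputs.

-- ===== PORT A =====

-- one in-place bubble pass of A's `for i in range(len(line) - 1)` loop: after a swap at
-- i, position i+1 holds "O" and the scan continues there, which is this recursion
def pvPassA : List String → List String × Bool
  | [] => ([], false)
  | [a] => ([a], false)
  | a :: b :: rest =>
    if a = "O" ∧ b = "." then
      ("." :: (pvPassA (a :: rest)).1, true)
    else
      (a :: (pvPassA (b :: rest)).1, (pvPassA (b :: rest)).2)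
termination_by l => l.length
decreasing_by all_goals simp

-- number of ("O", later ".") inversions: termination measure for A's `while swaps:` loop
def pvInv : List String → Nat
  | [] => 0
  | a :: t => (if a = "O" then t.count "." else 0) + pvInv t

-- a pass only swaps adjacent cells (needed below for the termination measure)
theorem pvPassA_perm (l : List String) : ((pvPassA l).1).Perm l := by
  fun_induction pvPassA l with
  | case1 => simp
  | case2 a => simp
  | case3 a b rest h ih =>
    obtain ⟨ha, hb⟩ := h; subst ha; subst hb
    exact (ih.cons ".").trans (List.Perm.swap "O" "." rest)
  | case4 a b rest h ih => exact ih.cons a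

-- a pass never increases the inversion count, and strictly decreases it if it swapped
theorem pvInv_pvPassA (l : List String) :
    pvInv (pvPassA l).1 ≤ pvInv l ∧ ((pvPassA l).2 = true → pvInv (pvPassA l).1 < pvInv l) := by
  fun_induction pvPassA l with
  | case1 => simp
  | case2 a => simp
  | case3 a b rest h ih =>
    obtain ⟨ha, hb⟩ := h; subst ha; subst hb
    have h1 := ih.1
    simp [pvInv] at h1 ⊢
    omega
  | case4 a b rest h ih =>
    have hc : ((pvPassA (b :: rest)).1).count "." = (b :: rest).count "." :=
      (pvPassA_perm (b :: rest)).count_eq "."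
    have e1 : pvInv (a :: (pvPassA (b :: rest)).1)
        = (if a = "O" then ((pvPassA (b :: rest)).1).count "." else 0) + pvInv (pvPassA (b :: rest)).1 := rfl
    have e2 : pvInv (a :: b :: rest)
        = (if a = "O" then (b :: rest).count "." else 0) + pvInv (b :: rest) := rfl
    have h1 := ih.1
    refine ⟨?_, fun hs => ?_⟩
    · rw [e1, e2, hc]; omega
    · have h2 := ih.2 hs
      rw [e1, e2, hc]; omega

-- A's `while swaps:` loop — repeat passes until a pass performs no swap
def pvWhileA (l : List String) : List String :=
  if h : (pvPassA l).2 = true then pvWhileA (pvPassA l).1 else (pvPassA l).1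
termination_by pvInv l
decreasing_by exact (pvInv_pvPassA l).2 h

def pvTiltRocksA (line : List String) (dir : String) : List String :=
  if dir = "WEST" ∨ dir = "NORTH" then (pvWhileA line.reverse).reverse  -- line[::-1] is List.reverse
  else pvWhileA line

def pvSumLen (rows : List (List String)) : Nat := (rows.map List.length).sum

-- zip(*rows): peel the first column if every row is nonempty, else stop (zip truncates)
def pvSplitRows : List (List String) → Option (List String × List (List String))
  | [] => some ([], [])
  | [] :: _ => none
  | (x :: xs) :: rest => (pvSplitRows rest).map (fun p => (x :: p.1, xs :: p.2))

theorem pvSplitRows_sumLen (rows : List (List String)) (hd : List String)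
    (tl : List (List String)) (h : pvSplitRows rows = some (hd, tl)) :
    pvSumLen tl + rows.length = pvSumLen rows := by
  induction rows generalizing hd tl with
  | nil => simp [pvSplitRows] at h; simp [h.2, pvSumLen]
  | cons r rs ih =>
    cases r with
    | nil => simp [pvSplitRows] at h
    | cons x xs =>
      simp only [pvSplitRows, Option.map_eq_some_iff] at h
      obtain ⟨⟨h1, t1⟩, hp, he⟩ := h
      cases he
      have := ih h1 t1 hp
      simp [pvSumLen] at this ⊢
      omega

-- [list(col) for col in zip(*rows)]
def pvTransposeZ : List (List String) → List (List String)
  | [] => []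
  | r :: rs =>
    match h : pvSplitRows (r :: rs) with
    | none => []
    | some (hd, tl) => hd :: pvTransposeZ tl
termination_by rows => pvSumLen rows
decreasing_by
  have := pvSplitRows_sumLen (r :: rs) hd tl h
  simp at this ⊢
  omega

-- "".join(["".join(row) for row in rocks])
def pvJoinGrid (rocks : List (List String)) : String :=
  String.join (rocks.map String.join)

def pvTiltCycleA (rocks : List (List String)) : List (List String) :=
  (["NORTH", "WEST", "SOUTH", "EAST"] : List String).foldl (fun rocks dir =>
    let r1 := if dir = "NORTH" ∨ dir = "SOUTH" then pvTransposeZ rocks else rocks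
    let tilted := r1.foldl (fun acc line => acc ++ [pvTiltRocksA line dir]) []
    if dir = "NORTH" ∨ dir = "SOUTH" then pvTransposeZ tilted else tilted) rocks

-- `for _ in range(remainingCycles): tilted = tiltCycle(tilted)`
def pvIterA : Nat → List (List String) → List (List String)
  | 0, g => g
  | n + 1, g => pvIterA n (pvTiltCycleA g)

-- fuel for the unbounded `while` loop: with m cells there are at most m^m distinct
-- rearranged states, so the history repeats before the fuel runs out; the fallback is
-- the same in both ports, so the equivalence below does not depend on this bound
def pvFuel (rocks : List (List String)) : Nat :=
  pvSumLen rocks ^ pvSumLen rocks + 2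

def pvLoopA (fuel : Nat) (tilted : List (List String)) (cycleCount : Int)
    (hist : PySem.Dict String Int) (N : Int) : List (List String) :=
  match fuel with
  | 0 => tilted
  | fuel + 1 =>
    let tilted' := pvTiltCycleA tilted
    let c := cycleCount + 1
    let lookup := pvJoinGrid tilted'
    if c = N then tilted'
    else
      match hist.get? lookup with
      | none => pvLoopA fuel tilted' c (hist.insert lookup c) N
      | some j =>
        let cycleLength := c - j
        let remaining := PySem.Int.mod (N - j) cycleLength
        pvIterA remaining.toNat tilted'

def runForNCycles (rocks : List (List String)) (N : Int) : List (List String) :=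
  let hist : PySem.Dict String Int := (PySem.Dict.empty).insert (pvJoinGrid rocks) 0
  pvLoopA (pvFuel rocks) rocks 0 hist N

-- ===== PORT B =====

-- B's single counting pass: o/d count the "O"/"." cells of the current run, any other
-- cell flushes the run as dots-then-O's
def pvPackGo (o d : Nat) : List String → List String
  | [] => List.replicate d "." ++ List.replicate o "O"
  | c :: rest =>
    if c = "O" then pvPackGo (o + 1) d rest
    else if c = "." then pvPackGo o (d + 1) rest
    else List.replicate d "." ++ List.replicate o "O" ++ c :: pvPackGo 0 0 rest

def pvTiltLineB (line : List String) (dir : String) : List String :=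
  if "O" ∉ line ∨ "." ∉ line then line  -- nothing can move: no rock, or no space
  else if dir = "WEST" ∨ dir = "NORTH" then (pvPackGo 0 0 line.reverse).reverse
  else pvPackGo 0 0 line

def pvTiltCycleB (rocks : List (List String)) : List (List String) :=
  (["NORTH", "WEST", "SOUTH", "EAST"] : List String).foldl (fun rocks dir =>
    let r1 := if dir = "NORTH" ∨ dir = "SOUTH" then pvTransposeZ rocks else rocks
    let tilted := r1.map (fun line => pvTiltLineB line dir)
    if dir = "NORTH" ∨ dir = "SOUTH" then pvTransposeZ tilted else tilted) rocks

def pvIterB : Nat → List (List String) → List (List String)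
  | 0, g => g
  | n + 1, g => pvIterB n (pvTiltCycleB g)

def pvLoopB (fuel : Nat) (tilted : List (List String)) (seen : List String)
    (N : Int) : List (List String) :=
  match fuel with
  | 0 => tilted
  | fuel + 1 =>
    let tilted' := pvTiltCycleB tilted
    let k := pvJoinGrid tilted'
    if (seen.length : Int) = N then tilted'
    else
      match PySem.List.index? seen k with
      | some i =>
        let period := (seen.length : Int) - (i : Int)
        pvIterB (PySem.Int.mod (N - (i : Int)) period).toNat tilted'
      | none => pvLoopB fuel tilted' (seen ++ [k]) N

def runForNCycles_alt (rocks : List (List String)) (N : Int) : List (List String) :=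
  pvLoopB (pvFuel rocks) rocks [pvJoinGrid rocks] N

-- ===== PRECONDITION & SPEC =====
def Spec_runForNCycles (rocks : List (List String)) (N : Int) (out : List (List String)) : Prop := out = runForNCycles_alt rocks N
instance (rocks : List (List String)) (N : Int) (out : List (List String)) : Decidable (Spec_runForNCycles rocks N out) := by unfold Spec_runForNCycles; infer_instance

-- ===== CLAIM (what is proved, stated in full; the proofs are below) =====
def Claim_equal_runForNCycles : Prop := ∀ (rocks : List (List String)) (N : Int), Dom_runForNCycles rocks N → Spec_runForNCycles rocks N (runForNCycles rocks N)

-- ===== LEMMAS AND PROOFS =====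

-- a pass that swapped nothing left the line unchanged
theorem pvPassA_false_id (l : List String) (h : (pvPassA l).2 = false) : (pvPassA l).1 = l := by
  fun_induction pvPassA l with
  | case1 => rfl
  | case2 a => rfl
  | case3 a b rest hc ih => simp at h
  | case4 a b rest hc ih => simp_all

-- one bubble pass does not change the packed form
theorem pvPack_inv (l : List String) : ∀ o d, pvPackGo o d (pvPassA l).1 = pvPackGo o d l := by
  fun_induction pvPassA l with
  | case1 => intro o d; rfl
  | case2 a => intro o d; rfl
  | case3 a b rest h ih =>
    obtain ⟨ha, hb⟩ := h; subst ha; subst hb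
    intro o d
    show pvPackGo o d ("." :: (pvPassA ("O" :: rest)).1) = pvPackGo o d ("O" :: "." :: rest)
    rw [show pvPackGo o d ("." :: (pvPassA ("O" :: rest)).1)
        = pvPackGo o (d + 1) (pvPassA ("O" :: rest)).1 by simp [pvPackGo]]
    rw [ih o (d + 1)]
    simp [pvPackGo]
  | case4 a b rest h ih =>
    intro o d
    show pvPackGo o d (a :: (pvPassA (b :: rest)).1) = pvPackGo o d (a :: b :: rest)
    by_cases hO : a = "O"
    · subst hO
      rw [show ∀ t, pvPackGo o d ("O" :: t) = pvPackGo (o + 1) d t from fun t => by simp [pvPackGo]]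
      rw [show pvPackGo o d ("O" :: b :: rest) = pvPackGo (o + 1) d (b :: rest) by simp [pvPackGo]]
      exact ih _ _
    · by_cases hD : a = "."
      · subst hD
        rw [show ∀ t, pvPackGo o d ("." :: t) = pvPackGo o (d + 1) t from fun t => by simp [pvPackGo]]
        rw [show pvPackGo o d ("." :: b :: rest) = pvPackGo o (d + 1) (b :: rest) by simp [pvPackGo]]
        exact ih _ _
      · rw [show ∀ t, pvPackGo o d (a :: t)
            = List.replicate d "." ++ List.replicate o "O" ++ a :: pvPackGo 0 0 t from
            fun t => by simp [pvPackGo, hO, hD]]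
        rw [show pvPackGo o d (a :: b :: rest)
            = List.replicate d "." ++ List.replicate o "O" ++ a :: pvPackGo 0 0 (b :: rest) by
            simp [pvPackGo, hO, hD]]
        rw [ih 0 0]

-- a line with no swap left to do is already in packed form
theorem pvPack_noswap (l : List String) (h : (pvPassA l).2 = false) :
    ∀ o d, (o = 0 ∨ l.head? ≠ some ".") →
      pvPackGo o d l = List.replicate d "." ++ List.replicate o "O" ++ l := by
  induction l with
  | nil => intro o d _; simp [pvPackGo]
  | cons a t ih =>
    intro o d hside
    by_cases hO : a = "O"
    · subst hO
      have hhd : t.head? ≠ some "." := by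
        cases t with
        | nil => simp
        | cons b r =>
          by_cases hb : b = "."
          · subst hb; exfalso
            have : (pvPassA ("O" :: "." :: r)).2 = true := by
              simp [pvPassA]
            rw [h] at this; exact Bool.false_ne_true this
          · simpa using fun hh => hb hh
      have ht : (pvPassA t).2 = false := by
        cases t with
        | nil => simp [pvPassA]
        | cons b r =>
          have hbne : b ≠ "." := fun hb' => hhd (by simp [hb'])
          have : (pvPassA ("O" :: b :: r)) = ("O" :: (pvPassA (b :: r)).1, (pvPassA (b :: r)).2) := by
            simp [pvPassA, hbne]
          rw [this] at h; exact h
      rw [show pvPackGo o d ("O" :: t) = pvPackGo (o + 1) d t by simp [pvPackGo]]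
      rw [ih ht (o + 1) d (Or.inr hhd)]
      simp [List.replicate_succ' (n := o)]
    · by_cases hD : a = "."
      · subst hD
        have ho : o = 0 := by
          rcases hside with h0 | hne
          · exact h0
          · exact absurd rfl hne
        subst ho
        have ht : (pvPassA t).2 = false := by
          cases t with
          | nil => simp [pvPassA]
          | cons b r =>
            have : (pvPassA ("." :: b :: r)) = ("." :: (pvPassA (b :: r)).1, (pvPassA (b :: r)).2) := by
              simp [pvPassA]
            rw [this] at h; exact h
        rw [show pvPackGo 0 d ("." :: t) = pvPackGo 0 (d + 1) t by simp [pvPackGo]]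
        rw [ih ht 0 (d + 1) (Or.inl rfl)]
        simp [List.replicate_succ' (n := d)]
      · have ht : (pvPassA t).2 = false := by
          cases t with
          | nil => simp [pvPassA]
          | cons b r =>
            have : (pvPassA (a :: b :: r)) = (a :: (pvPassA (b :: r)).1, (pvPassA (b :: r)).2) := by
              simp [pvPassA, hO]
            rw [this] at h; exact h
        rw [show pvPackGo o d (a :: t)
            = List.replicate d "." ++ List.replicate o "O" ++ a :: pvPackGo 0 0 t by
            simp [pvPackGo, hO, hD]]
        rw [ih ht 0 0 (Or.inl rfl)]
        simp

-- the core: bubbling to a fixpoint computes the one-pass segment-pack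
theorem pvWhileA_eq_pack (l : List String) : pvWhileA l = pvPackGo 0 0 l := by
  rw [pvWhileA]
  by_cases h : (pvPassA l).2 = true
  · rw [dif_pos h, pvWhileA_eq_pack (pvPassA l).1]
    exact pvPack_inv l 0 0
  · rw [dif_neg h]
    have hf : (pvPassA l).2 = false := by simpa using h
    rw [pvPassA_false_id l hf, pvPack_noswap l hf 0 0 (Or.inl rfl)]
    simp
termination_by pvInv l
decreasing_by exact (pvInv_pvPassA l).2 h

-- a line without rocks ("O") is already packed
theorem pvPack_noO (l : List String) (h : "O" ∉ l) :
    ∀ d, pvPackGo 0 d l = List.replicate d "." ++ l := by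
  induction l with
  | nil => intro d; simp [pvPackGo]
  | cons a t ih =>
    intro d
    have ha : a ≠ "O" := fun hh => h (hh ▸ List.mem_cons_self)
    have ht : "O" ∉ t := fun hh => h (List.mem_cons_of_mem a hh)
    by_cases hD : a = "."
    · subst hD
      rw [show pvPackGo 0 d ("." :: t) = pvPackGo 0 (d + 1) t by simp [pvPackGo]]
      rw [ih ht (d + 1)]
      simp [List.replicate_succ' (n := d)]
    · rw [show pvPackGo 0 d (a :: t)
          = List.replicate d "." ++ List.replicate 0 "O" ++ a :: pvPackGo 0 0 t by
          simp [pvPackGo, ha, hD]]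
      rw [ih ht 0]
      simp

-- a line without spaces (".") is already packed
theorem pvPack_noDot (l : List String) (h : "." ∉ l) :
    ∀ o, pvPackGo o 0 l = List.replicate o "O" ++ l := by
  induction l with
  | nil => intro o; simp [pvPackGo]
  | cons a t ih =>
    intro o
    have ha : a ≠ "." := fun hh => h (hh ▸ List.mem_cons_self)
    have ht : "." ∉ t := fun hh => h (List.mem_cons_of_mem a hh)
    by_cases hO : a = "O"
    · subst hO
      rw [show pvPackGo o 0 ("O" :: t) = pvPackGo (o + 1) 0 t by simp [pvPackGo]]
      rw [ih ht (o + 1)]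
      simp [List.replicate_succ' (n := o)]
    · rw [show pvPackGo o 0 (a :: t)
          = List.replicate 0 "." ++ List.replicate o "O" ++ a :: pvPackGo 0 0 t by
          simp [pvPackGo, hO, ha]]
      rw [ih ht 0]
      simp

theorem pvPack_id_of_settled (l : List String) (h : "O" ∉ l ∨ "." ∉ l) :
    pvPackGo 0 0 l = l := by
  rcases h with h | h
  · simpa using pvPack_noO l h 0
  · simpa using pvPack_noDot l h 0

theorem pvTiltLine_eq (line : List String) (dir : String) :
    pvTiltRocksA line dir = pvTiltLineB line dir := by
  unfold pvTiltRocksA pvTiltLineB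
  rw [pvWhileA_eq_pack, pvWhileA_eq_pack]
  by_cases hs : "O" ∉ line ∨ "." ∉ line
  · rw [if_pos hs]
    have hrev : "O" ∉ line.reverse ∨ "." ∉ line.reverse := by
      simpa using hs
    rw [pvPack_id_of_settled line hs, pvPack_id_of_settled line.reverse hrev]
    simp
  · rw [if_neg hs]

theorem pvTiltCycle_eq (rocks : List (List String)) : pvTiltCycleA rocks = pvTiltCycleB rocks := by
  unfold pvTiltCycleA pvTiltCycleB
  simp only [List.foldl, PySem.List.foldl_append_singleton_eq_map, List.nil_append, pvTiltLine_eq]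

theorem pvIter_eq (n : Nat) : ∀ g, pvIterA n g = pvIterB n g := by
  induction n with
  | zero => intro g; rfl
  | succ n ih => intro g; rw [pvIterA, pvIterB, pvTiltCycle_eq, ih]

-- A's dict maps each seen key to its position in B's `seen` list; with that invariant
-- the two loops run in lockstep
theorem pvLoop_eq (fuel : Nat) : ∀ (tilted : List (List String)) (seen : List String) (N : Int)
    (hist : PySem.Dict String Int),
    (∀ s, hist.get? s = (PySem.List.index? seen s).map (fun n : Nat => (n : Int))) →
    pvLoopA fuel tilted ((seen.length : Int) - 1) hist N = pvLoopB fuel tilted seen N := by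
  induction fuel with
  | zero => intro tilted seen N hist _; rfl
  | succ fuel ih =>
    intro tilted seen N hist hinv
    rw [pvLoopA, pvLoopB]
    simp only [pvTiltCycle_eq]
    have hc : (seen.length : Int) - 1 + 1 = (seen.length : Int) := by ring
    rw [hc]
    set k := pvJoinGrid (pvTiltCycleB tilted) with hk
    by_cases hN : (seen.length : Int) = N
    · rw [if_pos hN, if_pos hN]
    · rw [if_neg hN, if_neg hN]
      rcases hidx : PySem.List.index? seen k with _ | i
      · have hg : hist.get? k = none := by rw [hinv k, hidx]; rfl
        rw [hg]
        show pvLoopA fuel (pvTiltCycleB tilted) (seen.length : Int)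
            (hist.insert k (seen.length : Int)) N
          = pvLoopB fuel (pvTiltCycleB tilted) (seen ++ [k]) N
        have hnotmem : k ∉ seen := (PySem.List.index?_eq_none_iff seen k).1 hidx
        have := ih (pvTiltCycleB tilted) (seen ++ [k]) N (hist.insert k (seen.length : Int)) ?_
        · rw [← this]
          congr 1
          simp
        · intro s
          rw [PySem.Dict.get?_insert]
          by_cases hs : s = k
          · subst hs
            rw [if_pos rfl, PySem.List.index?_append_singleton_self seen k hnotmem]
            rfl
          · rw [if_neg hs, hinv s]
            by_cases hm : s ∈ seen
            · rw [PySem.List.index?_append_of_mem [k] hm]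
            · have h1 : PySem.List.index? seen s = none := (PySem.List.index?_eq_none_iff seen s).2 hm
              have h2 : PySem.List.index? (seen ++ [k]) s = none := by
                rw [PySem.List.index?_eq_none_iff]
                simp [hm, hs]
              rw [h1, h2]
      · have hg : hist.get? k = some (i : Int) := by rw [hinv k, hidx]; rfl
        rw [hg]
        show pvIterA (PySem.Int.mod (N - (i : Int)) ((seen.length : Int) - (i : Int))).toNat
            (pvTiltCycleB tilted)
          = pvIterB (PySem.Int.mod (N - (i : Int)) ((seen.length : Int) - (i : Int))).toNat
            (pvTiltCycleB tilted)
        rw [pvIter_eq]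

-- ===== VERDICT (by name: the statement is the Claim_ definition above) =====
theorem runForNCycles_spec : Claim_equal_runForNCycles := by
  intro rocks N _
  unfold Spec_runForNCycles runForNCycles runForNCycles_alt
  have h := pvLoop_eq (pvFuel rocks) rocks [pvJoinGrid rocks] N
    ((PySem.Dict.empty).insert (pvJoinGrid rocks) 0) ?_
  · simpa using h
  · intro s
    rw [PySem.Dict.get?_insert]
    by_cases hs : s = pvJoinGrid rocks
    · subst hs
      simp [PySem.List.index?]
    · rw [PySem.List.index?_cons_of_ne _ (fun hh => hs hh.symm)]
      simp [PySem.Dict.get?_empty, hs, PySem.List.index?]
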